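-- pv_equiv track=rewrite | github.com/SourabhLahoti15/leetcode | 4158-AbsoluteDifferenceBetweenMaximumAndMinimumKElements/4158-AbsoluteDifferenceBetweenMaximumAndMinimumKElements.py | absDifference
-- ===== SOURCE A (Python) =====
-- def absDifference(nums, k):
--     """
--     :type nums: List[int]
--     :type k: int
--     :rtype: int
--     """
--     sortnums = sorted(nums)
--     l = sortnums[0 : k]
--     lsum = 0
--     for i in l:
--         lsum += i
--
--     r = sortnums[len(nums)-k : len(nums)]
--     rsum = 0
--     for i in r:
--         rsum += i
--
--     return abs(rsum-lsum)
-- ===== SOURCE B (Python) =====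
-- def _sum_smallest(xs, k):
--     # sum of the k smallest elements of xs (clamped to [0, len(xs)]), by quickselect
--     if k <= 0:
--         return 0
--     if k >= len(xs):
--         return sum(xs)
--     p = xs[len(xs) // 2]
--     less = [x for x in xs if x < p]
--     greater = [x for x in xs if x > p]
--     nl = len(less)
--     ne = len(xs) - nl - len(greater)
--     if k <= nl:
--         return _sum_smallest(less, k)
--     if k <= nl + ne:
--         return sum(less) + p * (k - nl)
--     return sum(less) + p * ne + _sum_smallest(greater, k - nl - ne)
--
--
-- def absDifference(nums, k):
--     total = sum(nums)
--     small = _sum_smallest(nums, k)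
--     large = total - _sum_smallest(nums, len(nums) - k)
--     return abs(large - small)
-- ===== Notes on version B (the rewrite author's own statement) =====
-- stated objective: alternative
-- what changed: A fully sorts the list and sums two slices; B never sorts: it computes the sum of the k smallest (and, via the total, the k largest) elements with a quickselect-style three-way-partition recursion.
-- outside the precondition, e.g. on absDifference([1, 2, 3], 4): A returns 3, B returns 0; on absDifference([1, 2, 3], -1): A returns 3, B returns 0
import Mathlib
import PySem

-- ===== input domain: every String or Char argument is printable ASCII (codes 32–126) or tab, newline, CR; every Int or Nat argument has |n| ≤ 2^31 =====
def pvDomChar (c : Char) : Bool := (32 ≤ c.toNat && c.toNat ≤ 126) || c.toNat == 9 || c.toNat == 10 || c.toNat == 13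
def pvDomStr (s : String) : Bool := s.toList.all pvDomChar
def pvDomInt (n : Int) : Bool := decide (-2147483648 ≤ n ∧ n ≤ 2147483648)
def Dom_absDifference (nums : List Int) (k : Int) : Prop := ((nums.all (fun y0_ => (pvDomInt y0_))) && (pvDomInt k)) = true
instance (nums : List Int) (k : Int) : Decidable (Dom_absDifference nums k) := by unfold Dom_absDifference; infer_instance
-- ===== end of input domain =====

-- B replaces A's full sort with a quickselect-style recursion (sum of the k smallest elements by
-- three-way partitioning): a genuinely different algorithm, with similar measured cost in CPython.

-- ===== PORT A =====
def absDifference (nums : List Int) (k : Int) : Int :=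
  let sortnums := PySem.List.sorted nums (fun x => x) false
  let l := PySem.List.slice sortnums (some 0) (some k)
  let lsum := l.foldl (fun acc i => acc + i) 0
  let r := PySem.List.slice sortnums (some ((nums.length : Int) - k)) (some (nums.length : Int))
  let rsum := r.foldl (fun acc i => acc + i) 0
  |rsum - lsum|

-- ===== PORT B =====
-- _sum_smallest from Source B: quickselect-style sum of the k smallest elements.
def sumSmallest (xs : List Int) (k : Int) : Int :=
  if k ≤ 0 then 0
  else if (xs.length : Int) ≤ k then xs.sum
  else
    -- xs[len(xs) // 2]: the index is in range here (xs is nonempty), so getD's default is never used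
    let p := xs.getD (xs.length / 2) 0
    let less := xs.filter (fun x => x < p)
    let greater := xs.filter (fun x => p < x)
    let nl : Int := less.length
    let ne : Int := (xs.length : Int) - nl - greater.length
    if k ≤ nl then sumSmallest less k
    else if k ≤ nl + ne then less.sum + p * (k - nl)
    else less.sum + p * ne + sumSmallest greater (k - nl - ne)
termination_by xs.length
decreasing_by
  all_goals
    simp only [List.length_unattach]
    have hmem : xs.getD (xs.length / 2) 0 ∈ xs := by
      rw [List.getD_eq_getElem xs 0 (by omega)]
      exact List.getElem_mem _
    exact lt_of_lt_of_eq
      (List.length_filter_lt_length_iff_exists.mpr ⟨⟨_, hmem⟩, List.mem_attach _ _, by simp⟩)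
      List.length_attach

def absDifference_alt (nums : List Int) (k : Int) : Int :=
  let total := nums.sum
  let small := sumSmallest nums k
  let large := total - sumSmallest nums ((nums.length : Int) - k)
  |large - small|

-- ===== PRECONDITION & SPEC =====
-- Pre_ excludes exactly the bands -len(nums) < k < 0 and len(nums) < k < 2*len(nums): an
-- unspecified corner of the problem, where A's slice-clamped value and B's count-clamped value
-- are different but equally accidental choices (for k at or beyond those bands both return 0).
def Pre_absDifference (nums : List Int) (k : Int) : Prop :=
  (0 ≤ k ∧ k ≤ (nums.length : Int)) ∨ k ≤ -(nums.length : Int) ∨ 2 * (nums.length : Int) ≤ k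
instance (nums : List Int) (k : Int) : Decidable (Pre_absDifference nums k) := by unfold Pre_absDifference; infer_instance
def pvWitness_absDifference : List Int × Int := ([3, -1, 4, 1, 5], 2)

def Spec_absDifference (nums : List Int) (k : Int) (out : Int) : Prop := out = absDifference_alt nums k
instance (nums : List Int) (k : Int) (out : Int) : Decidable (Spec_absDifference nums k out) := by unfold Spec_absDifference; infer_instance

-- ===== CLAIM (what is proved, stated in full; the proofs are below) =====
def Claim_equal_absDifference : Prop := ∀ (nums : List Int) (k : Int), Dom_absDifference nums k → Pre_absDifference nums k → Spec_absDifference nums k (absDifference nums k)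

-- ===== LEMMAS AND PROOFS =====

-- the three-way partition of xs around p is a permutation of xs
theorem partition_perm (xs : List Int) (p : Int) :
    (xs.filter (fun x => x < p) ++ xs.filter (fun x => x = p) ++ xs.filter (fun x => p < x)).Perm xs := by
  induction xs with
  | nil => simp
  | cons a t ih =>
    by_cases h1 : a < p
    · simpa [List.filter_cons, h1, ne_of_lt h1, asymm h1] using ih.cons a
    · by_cases h2 : a = p
      · subst h2
        have step : (t.filter (fun x => x < a) ++ a :: (t.filter (fun x => x = a) ++ t.filter (fun x => a < x))).Perm (a :: t) :=
          List.perm_middle.trans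
            (List.Perm.cons a (by simpa [List.append_assoc] using ih))
        simpa [List.filter_cons, lt_irrefl, List.append_assoc] using step
      · have h3 : p < a := lt_of_le_of_ne (not_lt.mp h1) (Ne.symm h2)
        have step : ((t.filter (fun x => x < p) ++ t.filter (fun x => x = p)) ++ a :: t.filter (fun x => p < x)).Perm (a :: t) :=
          List.perm_middle.trans
            (List.Perm.cons a (by simpa [List.append_assoc] using ih))
        simpa [List.filter_cons, h1, h2, h3, List.append_assoc] using step

-- sorted(xs) decomposes as sorted(less) ++ equal ++ sorted(greater)
theorem sorted_decomp (xs : List Int) (p : Int) :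
    PySem.List.sorted xs (fun x => x) =
      PySem.List.sorted (xs.filter (fun x => x < p)) (fun x => x)
        ++ xs.filter (fun x => x = p)
        ++ PySem.List.sorted (xs.filter (fun x => p < x)) (fun x => x) := by
  apply PySem.List.sorted_id_eq_of_perm_of_pairwise
  · exact (((PySem.List.sorted_perm _ _ false).append (List.Perm.refl _)).append
      (PySem.List.sorted_perm _ _ false)).trans (partition_perm xs p)
  · have hL : ∀ a ∈ PySem.List.sorted (xs.filter (fun x => x < p)) (fun x => x), a < p := by
      intro a ha
      simpa using (List.mem_filter.mp ((PySem.List.mem_sorted _ _ _ _).mp ha)).2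
    have hE : ∀ a ∈ xs.filter (fun x => x = p), a = p := by
      intro a ha; simpa using (List.mem_filter.mp ha).2
    have hG : ∀ a ∈ PySem.List.sorted (xs.filter (fun x => p < x)) (fun x => x), p < a := by
      intro a ha
      simpa using (List.mem_filter.mp ((PySem.List.mem_sorted _ _ _ _).mp ha)).2
    refine List.pairwise_append.mpr ⟨List.pairwise_append.mpr ⟨?_, ?_, ?_⟩, ?_, ?_⟩
    · exact PySem.List.sorted_pairwise _ _
    · exact List.pairwise_of_forall_mem_list (fun a ha b hb => by rw [hE a ha, hE b hb])
    · exact fun a ha b hb => (hE b hb) ▸ (hL a ha).le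
    · exact PySem.List.sorted_pairwise _ _
    · intro a ha b hb
      rcases List.mem_append.mp ha with h | h
      · exact ((hL a h).trans (hG b hb)).le
      · exact ((hE a h) ▸ (hG b hb)).le

theorem sumSmallest_eq (xs : List Int) (k : Int) :
    sumSmallest xs k = ((PySem.List.sorted xs (fun x => x)).take k.toNat).sum := by
  suffices H : ∀ (n : Nat) (xs : List Int) (k : Int), xs.length = n →
      sumSmallest xs k = ((PySem.List.sorted xs (fun x => x)).take k.toNat).sum from
    H xs.length xs k rfl
  intro n
  induction n using Nat.strong_induction_on with
  | _ n ih =>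
    intro xs k hlen
    subst hlen
    rw [sumSmallest.eq_def]
    by_cases h1 : k ≤ 0
    · rw [if_pos h1]
      have hk : k.toNat = 0 := by omega
      simp [hk]
    · rw [if_neg h1]
      by_cases h2 : (xs.length : Int) ≤ k
      · rw [if_pos h2, List.take_of_length_le (by rw [PySem.List.length_sorted]; omega)]
        exact ((PySem.List.sorted_perm xs _ false).sum_eq).symm
      · rw [if_neg h2]
        dsimp only
        have hmem : xs.getD (xs.length / 2) 0 ∈ xs := by
          rw [List.getD_eq_getElem xs 0 (by omega)]
          exact List.getElem_mem _
        set p := xs.getD (xs.length / 2) 0 with hp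
        set L := xs.filter (fun x => x < p) with hLdef
        set G := xs.filter (fun x => p < x) with hGdef
        set E := xs.filter (fun x => x = p) with hEdef
        have hperm := partition_perm xs p
        rw [← hLdef, ← hEdef, ← hGdef] at hperm
        have hlen3 : L.length + E.length + G.length = xs.length := by
          have h := hperm.length_eq
          simp only [List.length_append] at h
          omega
        have hLlt : L.length < xs.length :=
          List.length_filter_lt_length_iff_exists.mpr ⟨p, hmem, by simp⟩
        have hGlt : G.length < xs.length :=
          List.length_filter_lt_length_iff_exists.mpr ⟨p, hmem, by simp⟩
        have hErep : E = List.replicate E.length p :=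
          List.eq_replicate_of_mem (fun b hb => by simpa using (List.mem_filter.mp hb).2)
        have hSL : (PySem.List.sorted L (fun x => x)).length = L.length :=
          PySem.List.length_sorted _ _ _
        have hSLsum : (PySem.List.sorted L (fun x => x)).sum = L.sum :=
          (PySem.List.sorted_perm L _ false).sum_eq
        rw [sorted_decomp xs p, ← hLdef, ← hGdef, ← hEdef]
        by_cases h3 : k ≤ (L.length : Int)
        · rw [if_pos h3, ih L.length hLlt L k rfl]
          have e1 : k.toNat - (PySem.List.sorted L (fun x => x) ++ E).length = 0 := by
            simp [hSL]; omega
          have e2 : k.toNat - (PySem.List.sorted L (fun x => x)).length = 0 := by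
            rw [hSL]; omega
          rw [List.take_append, e1, List.take_append, e2]
          simp
        · rw [if_neg h3]
          by_cases h4 : k ≤ (L.length : Int) + ((xs.length : Int) - L.length - G.length)
          · rw [if_pos h4]
            have e1 : k.toNat - (PySem.List.sorted L (fun x => x) ++ E).length = 0 := by
              simp [hSL]; omega
            rw [List.take_append, e1, List.take_append, List.take_of_length_le (by omega : (PySem.List.sorted L (fun x => x)).length ≤ k.toNat)]
            have e2 : E.take (k.toNat - (PySem.List.sorted L (fun x => x)).length)
                = List.replicate (k.toNat - L.length) p := by
              rw [hSL]
              conv_lhs => rw [hErep]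
              rw [List.take_replicate, Nat.min_eq_left (by omega)]
            rw [e2]
            simp only [List.take_zero, List.sum_nil, add_zero, List.sum_append,
              List.sum_replicate, nsmul_eq_mul, hSLsum]
            have e3 : ((k.toNat - L.length : Nat) : Int) = k - L.length := by omega
            rw [e3]; ring
          · rw [if_neg h4]
            have e0 : (k - (L.length : Int) - ((xs.length : Int) - L.length - G.length)).toNat
                = k.toNat - L.length - E.length := by omega
            rw [ih G.length hGlt G _ rfl, e0]
            rw [List.take_append, List.take_of_length_le
              (by simp [hSL]; omega : (PySem.List.sorted L (fun x => x) ++ E).length ≤ k.toNat)]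
            have e1 : k.toNat - (PySem.List.sorted L (fun x => x) ++ E).length
                = k.toNat - L.length - E.length := by simp [hSL]; omega
            rw [e1]
            simp only [List.sum_append, hSLsum]
            have e2 : E.sum = (E.length : Int) * p := by
              conv_lhs => rw [hErep]
              simp [List.sum_replicate]
            have e3 : ((xs.length : Int) - L.length - G.length) = (E.length : Int) := by omega
            rw [e2, e3]; ring

theorem sumSmallest_nil (k : Int) : sumSmallest [] k = 0 := by
  rw [sumSmallest.eq_def]
  simp only [List.length_nil, Nat.cast_zero, List.sum_nil, List.filter_nil, List.getD_nil]
  split_ifs <;> (first | rfl | (exfalso; omega))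

theorem foldl_add_id (l : List Int) : l.foldl (fun acc i => acc + i) 0 = l.sum := by
  simpa using PySem.List.foldl_add l (fun x => x) 0

-- ===== VERDICT (by name: the statement is the Claim_ definition above) =====
theorem absDifference_spec : Claim_equal_absDifference := by
  intro nums k _ hpre
  unfold Spec_absDifference absDifference absDifference_alt
  dsimp only
  set S := PySem.List.sorted nums (fun x => x) false with hS
  have hSlen : S.length = nums.length := PySem.List.length_sorted _ _ _
  have hSsum : S.sum = nums.sum := (PySem.List.sorted_perm nums _ false).sum_eq
  by_cases hnil : nums = []
  · subst hnil
    have hS0 : S = [] := by rw [hS]; rfl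
    rw [hS0]
    simp [PySem.List.slice, sumSmallest_nil]
  have hn1 : 1 ≤ nums.length := List.length_pos_of_ne_nil hnil
  rcases hpre with ⟨hk0, hkn⟩ | hlo | hhi
  case _ =>
    rw [PySem.List.slice_zero_start, PySem.List.slice_to _ hk0,
    PySem.List.slice_toNat _ (by omega) (by omega),
    List.take_of_length_le (by rw [List.length_drop, hSlen]; omega),
    foldl_add_id, foldl_add_id, sumSmallest_eq, sumSmallest_eq, ← hS]
    have hsplit : (S.take (((nums.length : Int) - k).toNat)).sum
        + (S.drop (((nums.length : Int) - k).toNat)).sum = S.sum :=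
      List.sum_take_add_sum_drop S _
    congr 1
    omega
  case _ =>
    -- k ≤ -len: A sums two empty slices, B sums zero smallest against all of nums
    have hc1 : PySem.List.clampIdx S.length k = 0 := by
      simp only [PySem.List.clampIdx]; split_ifs <;> omega
    have hc2 : PySem.List.clampIdx S.length ((nums.length : Int) - k) = S.length := by
      simp only [PySem.List.clampIdx]; split_ifs <;> omega
    have hc3 : PySem.List.clampIdx S.length ((nums.length : Int)) = S.length := by
      simp only [PySem.List.clampIdx]; split_ifs <;> omega
    rw [PySem.List.slice_zero_start]
    simp only [PySem.List.slice, hc1, hc2, hc3]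
    rw [sumSmallest.eq_def (k := k), if_pos (by omega)]
    rw [sumSmallest.eq_def (k := (nums.length : Int) - k), if_neg (by omega), if_pos (by omega)]
    simp
  case _ =>
    -- 2*len ≤ k: A sums the whole sorted list twice, B subtracts the full sum from itself
    have hc1 : PySem.List.clampIdx S.length k = S.length := by
      simp only [PySem.List.clampIdx]; split_ifs <;> omega
    have hc2 : PySem.List.clampIdx S.length ((nums.length : Int) - k) = 0 := by
      simp only [PySem.List.clampIdx]; split_ifs <;> omega
    have hc3 : PySem.List.clampIdx S.length ((nums.length : Int)) = S.length := by
      simp only [PySem.List.clampIdx]; split_ifs <;> omega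
    rw [PySem.List.slice_zero_start]
    simp only [PySem.List.slice, hc1, hc2, hc3]
    rw [sumSmallest.eq_def (k := k), if_neg (by omega), if_pos (by omega)]
    rw [sumSmallest.eq_def (k := (nums.length : Int) - k), if_pos (by omega)]
    simp [foldl_add_id, hSsum]
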